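-- pv_equiv track=rewrite | github.com/malinkang/GitHubPoster | github_heatmap/utils.py | make_github_level_thresholds
-- ===== SOURCE A (Python) =====
-- import math
--
-- def make_github_level_thresholds(number_list):
--     """
--     GitHub exposes contribution levels as NONE plus four quartiles.
--     This uses the non-zero daily values and a nearest-rank percentile.
--     """
--     positive_values = sorted(v for v in number_list if v > 0)
--     if not positive_values:
--         return ()
--
--     total = len(positive_values)
--
--     def nearest_rank(percentile):
--         index = max(0, math.ceil(total * percentile) - 1)
--         return positive_values[index]
--
--     return tuple(nearest_rank(p) for p in (0.25, 0.50, 0.75))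
-- ===== SOURCE B (Python) =====
-- def make_github_level_thresholds(number_list):
--     """
--     Same thresholds as A, but via expected-O(n) three-way quickselect on the
--     unsorted positive values instead of a full O(n log n) sort.
--     """
--     pos = [v for v in number_list if v > 0]
--     n = len(pos)
--     if n == 0:
--         return ()
--
--     def select(xs, k):
--         # k-th smallest (0-based) of xs by three-way partition quickselect
--         while True:
--             p = xs[len(xs) // 2]
--             lt = [x for x in xs if x < p]
--             gt = [x for x in xs if x > p]
--             ne = len(xs) - len(gt)  # count of elements <= p
--             if k < len(lt):
--                 xs = lt
--             elif k < ne: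
--                 return p
--             else:
--                 xs, k = gt, k - ne
--
--     # nearest-rank indices: ceil(n*p) - 1, as integer ceiling divisions
--     return tuple(select(pos, k) for k in ((n + 3) // 4 - 1, (n + 1) // 2 - 1, (3 * n + 3) // 4 - 1))
-- ===== Notes on version B (the rewrite author's own statement) =====
-- stated objective: alternative
-- what changed: Replaces the full sort plus indexing by an expected-linear three-way-partition quickselect run at the three fixed nearest-rank indices (computed as integer ceiling divisions instead of float math.ceil).
import Mathlib
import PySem

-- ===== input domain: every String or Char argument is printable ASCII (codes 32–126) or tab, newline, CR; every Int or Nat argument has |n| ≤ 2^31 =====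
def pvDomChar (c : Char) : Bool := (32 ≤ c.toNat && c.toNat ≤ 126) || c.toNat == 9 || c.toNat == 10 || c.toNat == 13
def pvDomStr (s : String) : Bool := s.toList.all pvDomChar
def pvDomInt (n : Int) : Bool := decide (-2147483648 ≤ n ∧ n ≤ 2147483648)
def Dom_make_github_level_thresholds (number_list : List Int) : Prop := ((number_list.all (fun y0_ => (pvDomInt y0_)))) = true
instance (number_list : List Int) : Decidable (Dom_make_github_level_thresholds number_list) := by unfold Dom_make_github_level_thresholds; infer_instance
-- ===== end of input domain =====

-- B replaces A's full sort by a three-way-partition quickselect at the three fixed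
-- nearest-rank indices (integer ceiling divisions instead of float math.ceil); alternative
-- algorithm, same exact results.


-- ===== PORT A =====
-- math.ceil(total * p) for p ∈ {0.25, 0.5, 0.75}: these are exact binary floats, so the
-- float product is exact (total < 2^53) and ceil(total · num/den) = (total·num + den - 1) / den
-- in integers; ported as that integer ceiling division. The index is always in range, so the
-- total form pyGetD (default never used) is the faithful port of positive_values[index].
def make_github_level_thresholds (number_list : List Int) : List Int :=
  let positive_values := PySem.List.sorted (number_list.filter (fun v => decide (0 < v))) (fun x => x) false
  if positive_values = [] then []
  else
    let total := positive_values.length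
    let nearest_rank := fun (num den : Nat) =>
      let index : Int := max 0 ((((total * num + (den - 1)) / den : Nat) : Int) - 1)
      PySem.List.pyGetD positive_values index 0
    [nearest_rank 1 4, nearest_rank 1 2, nearest_rank 3 4]

-- ===== PORT B =====
-- k-th smallest (0-based) by three-way partition quickselect (Source B's `select` loop)
-- pivot membership (used by the termination argument)
lemma pv_piv_mem (p : Int) (t : List Int) : (p :: t).getD ((p :: t).length / 2) p ∈ p :: t := by
  rw [List.getD_eq_getElem _ _ (by simp; omega)]
  exact List.getElem_mem _

def pvQSel : List Int → Nat → Int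
  | [], _ => 0
  | p :: t, k =>
    let piv := (p :: t).getD ((p :: t).length / 2) p    -- xs[len(xs) // 2]: index always in range
    let lt := (p :: t).filter (fun x => decide (x < piv))
    let gt := (p :: t).filter (fun x => decide (piv < x))
    let ne := (p :: t).length - gt.length
    if k < lt.length then pvQSel lt k
    else if k < ne then piv
    else pvQSel gt (k - ne)
termination_by xs _ => xs.length
decreasing_by
  · exact List.length_filter_lt_length_iff_exists.2 ⟨_, pv_piv_mem p t, by simp⟩
  · exact List.length_filter_lt_length_iff_exists.2 ⟨_, pv_piv_mem p t, by simp⟩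

def make_github_level_thresholds_alt (number_list : List Int) : List Int :=
  let pos := number_list.filter (fun v => decide (0 < v))
  let n := pos.length
  if n = 0 then []
  else [pvQSel pos ((n + 3) / 4 - 1), pvQSel pos ((n + 1) / 2 - 1), pvQSel pos ((3 * n + 3) / 4 - 1)]

-- ===== PRECONDITION & SPEC =====
def Spec_make_github_level_thresholds (number_list : List Int) (out : List Int) : Prop := out = make_github_level_thresholds_alt number_list
instance (number_list : List Int) (out : List Int) : Decidable (Spec_make_github_level_thresholds number_list out) := by unfold Spec_make_github_level_thresholds; infer_instance

-- ===== CLAIM (what is proved, stated in full; the proofs are below) =====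
def Claim_equal_make_github_level_thresholds : Prop := ∀ (number_list : List Int), Dom_make_github_level_thresholds number_list → Spec_make_github_level_thresholds number_list (make_github_level_thresholds number_list)

-- ===== LEMMAS AND PROOFS =====

-- three-way split of xs at pivot p is a permutation of xs
lemma pv_perm3 (p : Int) (xs : List Int) :
    (xs.filter (fun x => decide (x < p)) ++ xs.filter (fun x => decide (x = p)) ++ xs.filter (fun x => decide (p < x))).Perm xs := by
  induction xs with
  | nil => simp
  | cons a t ih =>
    rcases lt_trichotomy a p with h | h | h
    · simpa [List.filter_cons, h, not_lt.mpr h.le, h.ne] using ih.cons a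
    · subst h
      refine List.Perm.trans ?_ (ih.cons a)
      simpa [List.filter_cons, List.append_assoc] using (List.perm_middle (a := a)
        (l₁ := List.filter (fun x => decide (x < a)) t)
        (l₂ := List.filter (fun x => decide (x = a)) t ++ List.filter (fun x => decide (a < x)) t))
    · refine List.Perm.trans ?_ (ih.cons a)
      simpa [List.filter_cons, h, not_lt.mpr h.le, (ne_of_gt h), List.append_assoc] using
        (List.perm_middle (a := a)
          (l₁ := List.filter (fun x => decide (x < p)) t ++ List.filter (fun x => decide (x = p)) t)
          (l₂ := List.filter (fun x => decide (p < x)) t))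

-- sorted xs splits as sorted(<p) ++ (=p) ++ sorted(>p)
lemma pv_sorted_split (p : Int) (xs : List Int) :
    PySem.List.sorted xs (fun x => x) false =
      PySem.List.sorted (xs.filter (fun x => decide (x < p))) (fun x => x) false
      ++ xs.filter (fun x => decide (x = p))
      ++ PySem.List.sorted (xs.filter (fun x => decide (p < x))) (fun x => x) false := by
  apply PySem.List.sorted_id_eq_of_perm_of_pairwise
  · exact (((PySem.List.sorted_perm _ _ _).append (List.Perm.refl _)).append
      (PySem.List.sorted_perm _ _ _)).trans (pv_perm3 p xs)
  · have hlt : ∀ a ∈ PySem.List.sorted (xs.filter (fun x => decide (x < p))) (fun x => x) false, a < p := by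
      intro a ha
      have := (PySem.List.mem_sorted _ _ _ _).1 ha
      simpa using (List.mem_filter.1 this).2
    have heq : ∀ a ∈ xs.filter (fun x => decide (x = p)), a = p := by
      intro a ha; simpa using (List.mem_filter.1 ha).2
    have hgt : ∀ a ∈ PySem.List.sorted (xs.filter (fun x => decide (p < x))) (fun x => x) false, p < a := by
      intro a ha
      have := (PySem.List.mem_sorted _ _ _ _).1 ha
      simpa using (List.mem_filter.1 this).2
    rw [List.pairwise_append]
    refine ⟨?_, ?_, ?_⟩
    · rw [List.pairwise_append]
      refine ⟨by simpa using PySem.List.sorted_pairwise (xs.filter (fun x => decide (x < p))) (fun x => x),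
        List.pairwise_of_forall_mem_list (fun a ha b hb => by rw [heq a ha, heq b hb]), ?_⟩
      intro a ha b hb
      exact le_of_lt (lt_of_lt_of_le (hlt a ha) (heq b hb).ge)
    · simpa using PySem.List.sorted_pairwise (xs.filter (fun x => decide (p < x))) (fun x => x)
    · intro a ha b hb
      rcases List.mem_append.1 ha with ha' | ha'
      · exact le_of_lt (lt_of_lt_of_le (hlt a ha') (le_of_lt (hgt b hb)))
      · exact le_of_lt (lt_of_le_of_lt (heq a ha').le (hgt b hb))

-- total cut into the three partition sizes
lemma pv_len3 (p : Int) (xs : List Int) :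
    (xs.filter (fun x => decide (x < p))).length + (xs.filter (fun x => decide (x = p))).length
      + (xs.filter (fun x => decide (p < x))).length = xs.length := by
  have h := (pv_perm3 p xs).length_eq
  simp at h; omega

-- quickselect returns the k-th element of the sorted list
lemma pv_qsel_sorted_aux : ∀ (n : Nat) (xs : List Int) (k : Nat), xs.length ≤ n → k < xs.length →
    pvQSel xs k = (PySem.List.sorted xs (fun x => x) false).getD k 0 := by
  intro n
  induction n with
  | zero => intro xs k h hk; omega
  | succ n ih =>
    intro xs k hlen hk
    match xs with
    | [] => simp at hk
    | p :: t =>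
      rw [pvQSel]
      set piv := (p :: t).getD ((p :: t).length / 2) p with hpivdef
      have h3 := pv_len3 piv (p :: t)
      have hlt_lt : ((p :: t).filter (fun x => decide (x < piv))).length < (p :: t).length :=
        List.length_filter_lt_length_iff_exists.2 ⟨_, pv_piv_mem p t, by rw [hpivdef]; simp⟩
      have hgt_lt : ((p :: t).filter (fun x => decide (piv < x))).length < (p :: t).length :=
        List.length_filter_lt_length_iff_exists.2 ⟨_, pv_piv_mem p t, by rw [hpivdef]; simp⟩
      by_cases h1 : k < ((p :: t).filter (fun x => decide (x < piv))).length
      · rw [if_pos h1, pv_sorted_split piv (p :: t), List.append_assoc,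
          List.getD_append _ _ _ _ (by rw [PySem.List.length_sorted]; exact h1)]
        exact ih _ k (by omega) h1
      · by_cases h2 : k < (p :: t).length - ((p :: t).filter (fun x => decide (piv < x))).length
        · rw [if_neg h1, if_pos h2, pv_sorted_split piv (p :: t), List.append_assoc,
            List.getD_append_right _ _ _ _ (by rw [PySem.List.length_sorted]; omega),
            PySem.List.length_sorted,
            List.getD_append _ _ _ _ (by omega)]
          have hidx : k - ((p :: t).filter (fun x => decide (x < piv))).length
              < ((p :: t).filter (fun x => decide (x = piv))).length := by omega
          rw [List.getD_eq_getElem _ _ hidx]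
          have hm : ((p :: t).filter (fun x => decide (x = piv)))[k - ((p :: t).filter (fun x => decide (x < piv))).length] ∈ (p :: t).filter (fun x => decide (x = piv)) := List.getElem_mem _
          have hp := (List.mem_filter.1 hm).2
          simp only [decide_eq_true_eq] at hp
          exact hp.symm
        · rw [if_neg h1, if_neg h2, pv_sorted_split piv (p :: t),
            List.getD_append_right _ _ _ _ (by
              simp only [List.length_append, PySem.List.length_sorted]; omega)]
          have hlen2 : ((PySem.List.sorted ((p :: t).filter (fun x => decide (x < piv))) (fun x => x) false)
              ++ (p :: t).filter (fun x => decide (x = piv))).length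
              = (p :: t).length - ((p :: t).filter (fun x => decide (piv < x))).length := by
            simp only [List.length_append, PySem.List.length_sorted]; omega
          rw [hlen2]
          exact ih _ _ (by omega) (by omega)

lemma pv_qsel_sorted (xs : List Int) (k : Nat) (hk : k < xs.length) :
    pvQSel xs k = (PySem.List.sorted xs (fun x => x) false).getD k 0 :=
  pv_qsel_sorted_aux xs.length xs k le_rfl hk

-- ===== VERDICT (by name: the statement is the Claim_ definition above) =====
theorem make_github_level_thresholds_spec : Claim_equal_make_github_level_thresholds := by
  intro number_list _
  show make_github_level_thresholds number_list = make_github_level_thresholds_alt number_list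
  unfold make_github_level_thresholds make_github_level_thresholds_alt
  by_cases hnil : number_list.filter (fun v => decide (0 < v)) = []
  · simp [hnil, PySem.List.sorted_eq_nil_iff]
  · have hn : 0 < (number_list.filter (fun v => decide (0 < v))).length :=
      List.length_pos_of_ne_nil hnil
    simp only [PySem.List.sorted_eq_nil_iff, hnil, if_neg, PySem.List.length_sorted,
      List.length_eq_zero_iff, if_false]
    set pos := number_list.filter (fun v => decide (0 < v)) with hpos
    set n := pos.length with hdefn
    have key : ∀ (c : Nat), 1 ≤ c → c - 1 < n →
        PySem.List.pyGetD (PySem.List.sorted pos (fun x => x) false) (max 0 ((c : Int) - 1)) 0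
          = pvQSel pos (c - 1) := by
      intro c hc1 hcn
      have harith : (max 0 ((c : Int) - 1)) = ((c - 1 : Nat) : Int) := by omega
      rw [harith, PySem.List.pyGetD_natCast, ← pv_qsel_sorted pos (c - 1) hcn]
    have e1 : (n * 1 + (4 - 1)) / 4 = (n + 3) / 4 := by omega
    have e2 : (n * 1 + (2 - 1)) / 2 = (n + 1) / 2 := by omega
    have e3 : (n * 3 + (4 - 1)) / 4 = (3 * n + 3) / 4 := by omega
    rw [e1, e2, e3]
    rw [key ((n + 3) / 4) (by omega) (by omega),
      key ((n + 1) / 2) (by omega) (by omega),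
      key ((3 * n + 3) / 4) (by omega) (by omega)]
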